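-- pv_equiv track=rewrite | github.com/pablomarquezuax/Ejercicios-de-Recursividad | Bandera_de_Dijkstra.py | ordenar_fichas
-- ===== SOURCE A (Python) =====
-- def ordenar_fichas(fichas):
--     # Contar la frecuencia de cada color
--     frecuencia = {'rojo': 0, 'verde': 0, 'azul': 0}
--     for ficha in fichas:
--         if ficha == 'rojo':
--             frecuencia['rojo'] += 1
--         elif ficha == 'verde':
--             frecuencia['verde'] += 1
--         elif ficha == 'azul':
--             frecuencia['azul'] += 1
--
--     # Generar la secuencia ordenada de fichas
--     orden = []
--     for color, cantidad in frecuencia.items():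
--         orden.extend([color] * cantidad)
--
--     return orden
-- ===== SOURCE B (Python) =====
-- def ordenar_fichas(fichas):
--     rojo = [f for f in fichas if f == 'rojo']
--     verde = [f for f in fichas if f == 'verde']
--     azul = [f for f in fichas if f == 'azul']
--     return rojo + verde + azul
-- ===== Notes on version B (the rewrite author's own statement) =====
-- stated objective: simpler
-- what changed: B drops the frequency dict and the replicate-by-count regeneration: it collects the actual tokens with one filter per color and concatenates the three lists.
import Mathlib
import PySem

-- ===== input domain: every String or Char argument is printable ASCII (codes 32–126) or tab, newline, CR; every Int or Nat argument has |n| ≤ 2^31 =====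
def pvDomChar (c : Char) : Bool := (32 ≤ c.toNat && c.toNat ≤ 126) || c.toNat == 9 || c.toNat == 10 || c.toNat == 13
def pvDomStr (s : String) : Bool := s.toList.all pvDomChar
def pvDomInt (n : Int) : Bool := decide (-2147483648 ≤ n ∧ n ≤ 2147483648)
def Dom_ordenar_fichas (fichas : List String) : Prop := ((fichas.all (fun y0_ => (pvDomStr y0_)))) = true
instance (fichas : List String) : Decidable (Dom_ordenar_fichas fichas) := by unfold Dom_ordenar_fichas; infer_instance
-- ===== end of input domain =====

-- B replaces A's count-then-regenerate frequency dict with three per-color filters concatenated (simpler decomposition, same O(n) cost).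


-- ===== PORT A =====
def ordenar_fichas (fichas : List String) : List String :=
  -- frecuencia = {'rojo': 0, 'verde': 0, 'azul': 0}; the counting loop
  let frecuencia : PySem.Dict String Int :=
    fichas.foldl (fun d ficha =>
      if ficha == "rojo" then d.insert "rojo" (d.getD "rojo" 0 + 1)
      else if ficha == "verde" then d.insert "verde" (d.getD "verde" 0 + 1)
      else if ficha == "azul" then d.insert "azul" (d.getD "azul" 0 + 1)
      else d)
      (PySem.Dict.ofList [("rojo", 0), ("verde", 0), ("azul", 0)])
  -- orden = []; for color, cantidad in frecuencia.items(): orden.extend([color] * cantidad)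
  frecuencia.items.foldl (fun orden cv => orden ++ PySem.List.pyRepeat [cv.1] cv.2) []

-- ===== PORT B =====
def ordenar_fichas_alt (fichas : List String) : List String :=
  let rojo := fichas.filter (· == "rojo")
  let verde := fichas.filter (· == "verde")
  let azul := fichas.filter (· == "azul")
  rojo ++ verde ++ azul

-- ===== PRECONDITION & SPEC =====
def Spec_ordenar_fichas (fichas : List String) (out : List String) : Prop := out = ordenar_fichas_alt fichas
instance (fichas : List String) (out : List String) : Decidable (Spec_ordenar_fichas fichas out) := by unfold Spec_ordenar_fichas; infer_instance

-- ===== CLAIM (what is proved, stated in full; the proofs are below) =====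
def Claim_equal_ordenar_fichas : Prop := ∀ (fichas : List String), Dom_ordenar_fichas fichas → Spec_ordenar_fichas fichas (ordenar_fichas fichas)

-- ===== LEMMAS AND PROOFS =====

-- the three-key frequency dict as a function of its three counts
def pvFDict (r v a : Int) : PySem.Dict String Int :=
  PySem.Dict.mk [("rojo", r), ("verde", v), ("azul", a)]

theorem pvLoop (l : List String) (r v a : Int) :
    l.foldl (fun d ficha =>
      if ficha == "rojo" then d.insert "rojo" (d.getD "rojo" 0 + 1)
      else if ficha == "verde" then d.insert "verde" (d.getD "verde" 0 + 1)
      else if ficha == "azul" then d.insert "azul" (d.getD "azul" 0 + 1)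
      else d) (pvFDict r v a)
    = pvFDict (r + l.count "rojo") (v + l.count "verde") (a + l.count "azul") := by
  induction l generalizing r v a with
  | nil => simp [pvFDict]
  | cons x xs ih =>
    simp only [List.foldl_cons]
    by_cases hr : x = "rojo"
    · subst hr
      rw [if_pos (by decide)]
      rw [show (pvFDict r v a).insert "rojo" ((pvFDict r v a).getD "rojo" 0 + 1)
            = pvFDict (r + 1) v a by
          simp [pvFDict, PySem.Dict.insert, PySem.Dict.getD, PySem.Dict.get?,
            PySem.Dict.contains], ih]
      simp [pvFDict]
      omega
    · by_cases hv : x = "verde"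
      · subst hv
        rw [if_neg (by decide), if_pos (by decide)]
        rw [show (pvFDict r v a).insert "verde" ((pvFDict r v a).getD "verde" 0 + 1)
              = pvFDict r (v + 1) a by
            simp [pvFDict, PySem.Dict.insert, PySem.Dict.getD, PySem.Dict.get?,
              PySem.Dict.contains], ih]
        simp [pvFDict]
        omega
      · by_cases ha : x = "azul"
        · subst ha
          rw [if_neg (by decide), if_neg (by decide), if_pos (by decide)]
          rw [show (pvFDict r v a).insert "azul" ((pvFDict r v a).getD "azul" 0 + 1)
                = pvFDict r v (a + 1) by
              simp [pvFDict, PySem.Dict.insert, PySem.Dict.getD, PySem.Dict.get?,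
                PySem.Dict.contains], ih]
          simp [pvFDict]
          omega
        · rw [if_neg (by simp [hr]), if_neg (by simp [hv]), if_neg (by simp [ha]), ih]
          simp [hr, hv, ha]

-- ===== VERDICT (by name: the statement is the Claim_ definition above) =====
theorem ordenar_fichas_spec : Claim_equal_ordenar_fichas := by
  intro fichas _
  show ordenar_fichas fichas = ordenar_fichas_alt fichas
  unfold ordenar_fichas ordenar_fichas_alt
  have h0 : PySem.Dict.ofList [(("rojo" : String), (0 : Int)), ("verde", 0), ("azul", 0)]
      = pvFDict 0 0 0 := by decide
  rw [h0, pvLoop]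
  simp [pvFDict, List.foldl, PySem.List.pyRepeat_singleton, List.filter_beq]
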